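-- pv_equiv track=rewrite | github.com/anwala/bloc | bloc/util.py | segment_paren_word
-- ===== SOURCE A (Python) =====
-- def segment_paren_word(word, sort_paren=True):
--     word = word.strip()
--     if( word == '' ):
--         return []
--
--     paren_words = ['']
--     for w in word:
--
--         if( w == '(' ):
--             paren_words.append('')
--             continue
--         elif( w == ')' ):
--             paren_words[-1] = '(' + ''.join( sorted(paren_words[-1]) ) + ')' if sort_paren is True else '(' + paren_words[-1] + ')'
--             paren_words.append('')
--             continue
--
--         paren_words[-1] += w
--
--     paren_words = [w for w in paren_words if w != '']
--     return paren_words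
-- ===== SOURCE B (Python) =====
-- def segment_paren_word(word, sort_paren=True):
--     word = word.strip()
--     if word == '':
--         return []
--     # pass 1: tokenize into alternating [seg, delim, seg, ..., seg]
--     tokens = []
--     cur = ''
--     for ch in word:
--         if ch in '()':
--             tokens.append(cur)
--             tokens.append(ch)
--             cur = ''
--         else:
--             cur += ch
--     tokens.append(cur)
--     # pass 2: emit — a segment followed by ')' is wrapped (sorted if asked), others pass through if nonempty
--     out = []
--     for i in range(0, len(tokens), 2):
--         seg = tokens[i]
--         if i + 1 < len(tokens) and tokens[i + 1] == ')':
--             if sort_paren is True: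
--                 out.append('(' + ''.join(sorted(seg)) + ')')
--             else:
--                 out.append('(' + seg + ')')
--         elif seg != '':
--             out.append(seg)
--     return out
-- ===== Notes on version B (the rewrite author's own statement) =====
-- stated objective: faster
-- what changed: Replaced A's single character loop that rebuilds the accumulator's last string on every character (quadratic string concatenation via paren_words[-1] += w) with a two-pass decomposition: tokenize into alternating segment/delimiter tokens, then a second pass over segments that wraps (optionally sorting) each segment followed by ')' and passes nonempty raw segments through.
import Mathlib
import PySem

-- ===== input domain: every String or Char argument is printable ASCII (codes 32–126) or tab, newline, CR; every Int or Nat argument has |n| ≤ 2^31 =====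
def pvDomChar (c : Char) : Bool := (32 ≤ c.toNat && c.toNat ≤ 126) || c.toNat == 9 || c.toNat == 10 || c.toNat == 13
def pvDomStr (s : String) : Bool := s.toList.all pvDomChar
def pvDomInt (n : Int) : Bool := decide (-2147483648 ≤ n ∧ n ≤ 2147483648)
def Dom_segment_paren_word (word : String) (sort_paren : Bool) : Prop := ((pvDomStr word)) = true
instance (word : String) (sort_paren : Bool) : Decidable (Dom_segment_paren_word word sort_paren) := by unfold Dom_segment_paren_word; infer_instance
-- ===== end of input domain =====

-- B replaces A's single loop that rebuilds the accumulator's last string per character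
-- by a two-pass tokenize-then-emit decomposition (objective: faster, measured).
-- Strings are ported on the List Char side (PySem.Chars), mapped to String at the end.

-- ===== PORT A =====
-- '(' + ''.join(sorted(x)) + ')'  /  '(' + x + ')'
def pvWrapA (sp : Bool) (cs : List Char) : List Char :=
  if sp then '(' :: (PySem.List.sorted cs (fun c => c) ++ [')'])
  else '(' :: (cs ++ [')'])

-- one iteration of A's for-loop over the characters (paren_words, last element mutated)
def pvStepA (sp : Bool) (pws : List (List Char)) (w : Char) : List (List Char) :=
  if w = '(' then pws ++ [[]]
  else if w = ')' then pws.dropLast ++ [pvWrapA sp (pws.getLast?.getD []), []]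
  else pws.dropLast ++ [(pws.getLast?.getD []) ++ [w]]

def segment_paren_word (word : String) (sort_paren : Bool) : List String :=
  let w := PySem.Chars.strip word.toList
  if w = [] then []
  else ((w.foldl (pvStepA sort_paren) [[]]).filter (· ≠ [])).map String.mk

-- ===== PORT B =====
def pvWrapB (sp : Bool) (cs : List Char) : List Char :=
  if sp then '(' :: (PySem.List.sorted cs (fun c => c) ++ [')'])
  else '(' :: (cs ++ [')'])

-- pass 1 of B: split into alternating [segment, delimiter, …, segment]
def pvTokenize : List Char → List Char → List (List Char)
  | [], cur => [cur]
  | c :: cs, cur =>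
      if c = '(' ∨ c = ')' then cur :: [c] :: pvTokenize cs []
      else pvTokenize cs (cur ++ [c])

-- pass 2 of B: a segment followed by ')' is wrapped, others pass through if nonempty
def pvEmit (sp : Bool) : List (List Char) → List (List Char)
  | [] => []
  | [seg] => if seg ≠ [] then [seg] else []
  | seg :: d :: rest =>
      if d = [')'] then pvWrapB sp seg :: pvEmit sp rest
      else (if seg ≠ [] then [seg] else []) ++ pvEmit sp rest

def segment_paren_word_alt (word : String) (sort_paren : Bool) : List String :=
  let w := PySem.Chars.strip word.toList
  if w = [] then []
  else (pvEmit sort_paren (pvTokenize w [])).map String.mk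

-- ===== PRECONDITION & SPEC =====
def Spec_segment_paren_word (word : String) (sort_paren : Bool) (out : List String) : Prop := out = segment_paren_word_alt word sort_paren
instance (word : String) (sort_paren : Bool) (out : List String) : Decidable (Spec_segment_paren_word word sort_paren out) := by unfold Spec_segment_paren_word; infer_instance

-- ===== CLAIM (what is proved, stated in full; the proofs are below) =====
def Claim_equal_segment_paren_word : Prop := ∀ (word : String) (sort_paren : Bool), Dom_segment_paren_word word sort_paren → Spec_segment_paren_word word sort_paren (segment_paren_word word sort_paren)

-- ===== LEMMAS AND PROOFS =====

theorem pvWrapA_ne_nil (sp : Bool) (cs : List Char) : pvWrapA sp cs ≠ [] := by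
  unfold pvWrapA; split <;> simp

theorem pvWrapB_eq (sp : Bool) (cs : List Char) : pvWrapB sp cs = pvWrapA sp cs := rfl

theorem pv_filter_single (cur : List Char) :
    List.filter (fun x => !decide (x = [])) [cur] = if cur = [] then [] else [cur] := by
  by_cases hc : cur = [] <;> simp [hc]

-- main invariant: running A's loop from state frozen ++ [cur] and filtering
-- equals B's emit of the tokenization of the remaining characters
theorem pv_main (sp : Bool) : ∀ (cs : List Char) (frozen : List (List Char)) (cur : List Char),
    ((List.foldl (pvStepA sp) (frozen ++ [cur]) cs).filter (· ≠ [])) =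
      frozen.filter (· ≠ []) ++ pvEmit sp (pvTokenize cs cur) := by
  intro cs
  induction cs with
  | nil =>
      intro frozen cur
      simp [pvTokenize, pvEmit, List.filter_append, pv_filter_single]
  | cons c cs ih =>
      intro frozen cur
      by_cases h1 : c = '('
      · have : pvStepA sp (frozen ++ [cur]) c = (frozen ++ [cur]) ++ [[]] := by
          simp [pvStepA, h1]
        simp only [List.foldl_cons, this]
        rw [ih (frozen ++ [cur]) []]
        simp [pvTokenize, pvEmit, h1, List.filter_append, pv_filter_single]
      · by_cases h2 : c = ')'
        · have : pvStepA sp (frozen ++ [cur]) c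
              = (frozen ++ [pvWrapA sp cur]) ++ [[]] := by
            simp [pvStepA, h2]
          simp only [List.foldl_cons, this]
          rw [ih (frozen ++ [pvWrapA sp cur]) []]
          simp [pvTokenize, pvEmit, h2, pvWrapB_eq,
            List.filter_append, pvWrapA_ne_nil sp cur]
        · have : pvStepA sp (frozen ++ [cur]) c = frozen ++ [cur ++ [c]] := by
            simp [pvStepA, h1, h2]
          simp only [List.foldl_cons, this]
          rw [ih frozen (cur ++ [c])]
          simp [pvTokenize, h1, h2]

-- ===== VERDICT (by name: the statement is the Claim_ definition above) =====
theorem segment_paren_word_spec : Claim_equal_segment_paren_word := by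
  intro word sp _
  unfold Spec_segment_paren_word segment_paren_word segment_paren_word_alt
  simp only
  split
  · rfl
  · have := pv_main sp (PySem.Chars.strip word.toList) [] []
    simp only [List.nil_append, List.filter_nil] at this
    rw [this]
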